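-- pv_equiv track=rewrite | github.com/eyereasoner/eye | p3/cases/traffic_temporal.py | _parse_int_at
-- ===== SOURCE A (Python) =====
-- def _parse_int_at(s, idx):
--     # parse an integer starting at s[idx:]
--     neg = False
--     if idx < len(s) and s[idx] == '-':
--         neg = True
--         idx += 1
--     j = idx
--     while j < len(s) and s[j].isdigit():
--         j += 1
--     if j == idx:
--         return None, idx
--     val = int(s[idx:j])
--     if neg:
--         val = -val
--     return val, j
-- ===== SOURCE B (Python) =====
-- def _parse_int_at(s, idx):
--     # single pass: accumulate the value digit-by-digit instead of scan-then-int(slice)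
--     neg = idx < len(s) and s[idx] == '-'
--     j = idx + 1 if neg else idx
--     start = j
--     val = 0
--     while j < len(s) and s[j].isdigit():
--         val = val * 10 + (ord(s[j]) - 48)
--         j += 1
--     if j == start:
--         return None, j
--     return (-val if neg else val), j
-- ===== Notes on version B (the rewrite author's own statement) =====
-- stated objective: alternative
-- what changed: B builds the value in a single digit-accumulating pass (val = val*10 + digit) instead of A's scan-to-find-the-end followed by int() on the slice.
-- outside the precondition, e.g. on _parse_int_at('12', -1): A returns (2, 2), B returns (212, 2)
import Mathlib
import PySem

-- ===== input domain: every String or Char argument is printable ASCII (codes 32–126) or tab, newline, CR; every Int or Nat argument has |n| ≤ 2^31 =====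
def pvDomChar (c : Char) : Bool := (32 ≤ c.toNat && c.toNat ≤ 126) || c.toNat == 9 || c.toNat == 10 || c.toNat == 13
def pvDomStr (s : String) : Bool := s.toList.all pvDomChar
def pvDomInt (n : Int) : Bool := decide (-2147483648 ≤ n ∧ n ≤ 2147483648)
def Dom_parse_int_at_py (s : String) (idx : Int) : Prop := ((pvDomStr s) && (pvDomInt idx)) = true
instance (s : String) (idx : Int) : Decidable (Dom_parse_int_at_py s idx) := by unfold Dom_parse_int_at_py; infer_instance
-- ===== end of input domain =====

-- B replaces A's scan-then-int(slice) with a single digit-accumulating pass (alternative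
-- decomposition, no speed claim); equivalence is proved for idx ≥ 0 (see Pre_ below).

-- value of one ASCII decimal digit character; used to port int() on the nonempty all-digit
-- ASCII slices A produces inside Pre_ (there int() is exactly decimal accumulation — no sign,
-- whitespace or underscore can occur in a run of isdigit characters), and ord(c) - 48 in B
def pvDigit (c : Char) : Int := (c.toNat : Int) - 48

-- ===== PORT A =====
-- 'while j < len(s) and s[j].isdigit(): j += 1' (j ≥ 0; inside Pre_ every j the loop visits is ≥ 0)
def pvScanA (cs : List Char) (j : Nat) : Nat :=
  if h : j < cs.length then
    if PySem.Chars.isdigit cs[j] then pvScanA cs (j + 1) else j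
  else j
termination_by cs.length - j

def parse_int_at_py (s : String) (idx : Int) : Option Int × Int :=
  let cs := s.toList
  let n : Int := PySem.Str.len s
  let negi : Bool × Int :=
    if idx < n ∧ PySem.Str.pyGet? s idx = some '-' then (true, idx + 1) else (false, idx)
  let neg := negi.1
  let i := negi.2
  -- inside Pre_ (0 ≤ idx) we have 0 ≤ i, and the while loop is pvScanA from i
  let j : Int := if 0 ≤ i then (pvScanA cs i.toNat : Int) else i
  if j = i then (none, i)
  else
    -- val = int(s[i:j]); exact on Pre_ ∧ Dom: the slice is a nonempty run of ASCII digits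
    let val : Int := (PySem.List.slice cs (some i) (some j)).foldl (fun a c => a * 10 + pvDigit c) 0
    ((if neg then some (-val) else some val), j)

-- ===== PORT B =====
-- 'while j < len(s) and s[j].isdigit(): val = val*10 + (ord(s[j]) - 48); j += 1'
def pvLoopB (cs : List Char) (j : Nat) (val : Int) : Nat × Int :=
  if h : j < cs.length then
    if PySem.Chars.isdigit cs[j] then pvLoopB cs (j + 1) (val * 10 + pvDigit cs[j]) else (j, val)
  else (j, val)
termination_by cs.length - j

def parse_int_at_py_alt (s : String) (idx : Int) : Option Int × Int :=
  let cs := s.toList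
  let n : Int := PySem.Str.len s
  let neg : Bool := decide (idx < n) && (PySem.Str.pyGet? s idx == some '-')
  let start : Int := if neg then idx + 1 else idx
  let jv : Int × Int :=
    if 0 ≤ start then (let p := pvLoopB cs start.toNat 0; ((p.1 : Int), p.2)) else (start, 0)
  let j := jv.1
  let val := jv.2
  if j = start then (none, j)
  else ((if neg then some (-val) else some val), j)

-- ===== PRECONDITION & SPEC =====
-- Pre_ excludes negative idx: there Python's negative-index wraparound makes A's result accidental
-- (the scan walks wrapped indices while the value comes from the slice s[idx:j], so A can return a
-- value read from a different part of the string, or raise ValueError/IndexError); B's wrapped scan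
-- is equally accidental, and neither value is the one anyone would specify.
def Pre_parse_int_at_py (s : String) (idx : Int) : Prop := 0 ≤ idx
instance (s : String) (idx : Int) : Decidable (Pre_parse_int_at_py s idx) := by
  unfold Pre_parse_int_at_py; infer_instance

def pvWitness_parse_int_at_py : String × Int := ("a-12", 1)

def Spec_parse_int_at_py (s : String) (idx : Int) (out : Option Int × Int) : Prop := out = parse_int_at_py_alt s idx
instance (s : String) (idx : Int) (out : Option Int × Int) : Decidable (Spec_parse_int_at_py s idx out) := by unfold Spec_parse_int_at_py; infer_instance

-- ===== CLAIM (what is proved, stated in full; the proofs are below) =====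
def Claim_equal_parse_int_at_py : Prop := ∀ (s : String) (idx : Int), Dom_parse_int_at_py s idx → Pre_parse_int_at_py s idx → Spec_parse_int_at_py s idx (parse_int_at_py s idx)

-- ===== LEMMAS AND PROOFS =====

theorem pvScanA_le (cs : List Char) (j : Nat) : j ≤ pvScanA cs j := by
  unfold pvScanA
  split_ifs with h1 h2
  · exact le_trans (Nat.le_succ j) (pvScanA_le cs (j + 1))
  · exact le_refl j
  · exact le_refl j
termination_by cs.length - j

-- B's loop = A's scan for the end index, and A's fold over the scanned segment for the value
theorem pvLoopB_eq (cs : List Char) (j : Nat) (val : Int) :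
    pvLoopB cs j val =
      (pvScanA cs j,
       ((cs.drop j).take (pvScanA cs j - j)).foldl (fun a c => a * 10 + pvDigit c) val) := by
  unfold pvLoopB pvScanA
  split_ifs with h1 h2
  · rw [pvLoopB_eq cs (j + 1) (val * 10 + pvDigit cs[j])]
    have hdrop : cs.drop j = cs[j] :: cs.drop (j + 1) := List.drop_eq_getElem_cons h1
    have hstep : pvScanA cs (j + 1) - j = (pvScanA cs (j + 1) - (j + 1)) + 1 := by
      have := pvScanA_le cs (j + 1); omega
    rw [hdrop, hstep, List.take_succ_cons, List.foldl_cons]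
  · simp
  · simp
termination_by cs.length - j

theorem parse_int_at_py_spec : Claim_equal_parse_int_at_py := by
  intro s idx _hdom hpre
  unfold Pre_parse_int_at_py at hpre
  unfold Spec_parse_int_at_py parse_int_at_py parse_int_at_py_alt
  dsimp only
  by_cases hneg : idx < PySem.Str.len s ∧ PySem.Str.pyGet? s idx = some '-'
  · have h0 : (0:Int) ≤ idx + 1 := by omega
    rw [if_pos hneg]
    have hb : (decide (idx < PySem.Str.len s) && (PySem.Str.pyGet? s idx == some '-')) = true := by
      rw [decide_eq_true hneg.1, beq_iff_eq.mpr hneg.2, Bool.and_self]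
    rw [hb]
    simp only [if_pos h0, if_true, pvLoopB_eq]
    by_cases hj : ((pvScanA s.toList (idx + 1).toNat : Int)) = idx + 1
    · simp [hj]
    · rw [PySem.List.slice_toNat _ h0 (Int.natCast_nonneg _)]
      simp [hj]
  · have hbf : (decide (idx < PySem.Str.len s) && (PySem.Str.pyGet? s idx == some '-')) = false := by
      rcases not_and_or.mp hneg with h | h
      · rw [decide_eq_false h, Bool.false_and]
      · rw [beq_eq_false_iff_ne.mpr h, Bool.and_false]
    rw [if_neg hneg, hbf]
    simp only [Bool.false_eq_true, if_false, if_pos hpre, pvLoopB_eq]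
    by_cases hj : ((pvScanA s.toList idx.toNat : Int)) = idx
    · simp [hj]
    · rw [PySem.List.slice_toNat _ hpre (Int.natCast_nonneg _)]
      simp [hj]
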